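-- pv_equiv track=rewrite | github.com/MoritzSll/SSG | src/markdown_blocks.py | is_heading_block
-- ===== SOURCE A (Python) =====
-- def is_heading_block(markdown):
--     if markdown[0] == "#":
--         for i,char in enumerate(markdown):
--             if i < 6 and char == "#":
--                 continue
--             if i < 7 and char == " ":
--                 return True
--             else:
--                 return False
--     return
-- ===== SOURCE B (Python) =====
-- def is_heading_block(markdown):
--     if markdown[0] != "#":
--         return
--     level = len(markdown) - len(markdown.lstrip("#"))
--     if level > 6:
--         return False
--     rest = markdown[level:]
--     if not rest:
--         return
--     return rest[0] == " "
-- ===== Notes on version B (the rewrite author's own statement) =====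
-- stated objective: simpler
-- what changed: Replaces the indexed enumerate scan with one strip of the leading hash characters, then decides by length arithmetic and a single character test.
import Mathlib
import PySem

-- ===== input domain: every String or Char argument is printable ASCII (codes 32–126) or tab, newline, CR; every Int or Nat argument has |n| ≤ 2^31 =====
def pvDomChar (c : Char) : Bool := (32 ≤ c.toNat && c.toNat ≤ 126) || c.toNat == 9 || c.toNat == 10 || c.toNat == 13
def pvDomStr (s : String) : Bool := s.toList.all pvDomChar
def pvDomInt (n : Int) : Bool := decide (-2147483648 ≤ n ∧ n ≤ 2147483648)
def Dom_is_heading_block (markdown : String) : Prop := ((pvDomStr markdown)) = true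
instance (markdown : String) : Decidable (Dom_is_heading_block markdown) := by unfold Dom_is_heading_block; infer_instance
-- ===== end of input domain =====

-- B replaces A's indexed character scan with a strip-leading-hashes count plus length arithmetic (simpler decomposition, same cost).


-- ===== PORT A =====
-- the 'for i,char in enumerate(markdown)' loop with its early returns
def isHeadingLoopA : Int → List Char → Option Bool
  | _, [] => none                                   -- loop ends, function falls through to 'return' (None)
  | i, c :: cs =>
    if i < 6 && c == '#' then isHeadingLoopA (i + 1) cs
    else if i < 7 && c == ' ' then some true
    else some false

def is_heading_block (markdown : String) : Option Bool :=
  -- markdown[0]: on the empty string Python raises IndexError (excluded by Pre_)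
  match markdown.toList with
  | [] => none
  | c :: _ => if c == '#' then isHeadingLoopA 0 markdown.toList else none

-- ===== PORT B =====
def is_heading_block_alt (markdown : String) : Option Bool :=
  match markdown.toList with
  | [] => none                                      -- markdown[0] raises IndexError (excluded by Pre_)
  | c :: _ =>
    if c != '#' then none
    else
      -- len(markdown) - len(markdown.lstrip('#')); lstrip('#') is exactly dropWhile (· == '#')
      let stripped := markdown.toList.dropWhile (· == '#')
      let level : Int := (markdown.toList.length : Int) - (stripped.length : Int)
      if level > 6 then some false
      else
        -- markdown[level:] with 0 ≤ level ≤ len: exactly drop level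
        match markdown.toList.drop level.toNat with
        | [] => none
        | r :: _ => some (r == ' ')

-- ===== PRECONDITION & SPEC =====
-- A (and B) raise IndexError on the empty string; nothing else raises.
def Pre_is_heading_block (markdown : String) : Prop := markdown ≠ ""
instance (markdown : String) : Decidable (Pre_is_heading_block markdown) := by unfold Pre_is_heading_block; infer_instance
def pvWitness_is_heading_block : String := "# hi"

def Spec_is_heading_block (markdown : String) (out : Option Bool) : Prop := out = is_heading_block_alt markdown
instance (markdown : String) (out : Option Bool) : Decidable (Spec_is_heading_block markdown out) := by unfold Spec_is_heading_block; infer_instance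

-- ===== CLAIM (what is proved, stated in full; the proofs are below) =====
def Claim_equal_is_heading_block : Prop := ∀ (markdown : String), Dom_is_heading_block markdown → Pre_is_heading_block markdown → Spec_is_heading_block markdown (is_heading_block markdown)

-- ===== LEMMAS AND PROOFS =====

-- A's loop, in terms of the leading-hash count and the stripped remainder
theorem isHeadingLoopA_eq (cs : List Char) : ∀ (i : Int), 0 ≤ i → i ≤ 6 →
    isHeadingLoopA i cs =
      (if ((cs.takeWhile (· == '#')).length : Int) + i > 6 then some false
       else match cs.dropWhile (· == '#') with
            | [] => none
            | r :: _ => some (r == ' ')) := by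
  induction cs with
  | nil => intro i h0 h6; simp [isHeadingLoopA]; omega
  | cons c cs ih =>
    intro i h0 h6
    by_cases hc : c = '#'
    · subst hc
      by_cases hi : i < 6
      · rw [show isHeadingLoopA i ('#' :: cs) = isHeadingLoopA (i + 1) cs by
          simp [isHeadingLoopA, hi]]
        rw [ih (i + 1) (by omega) (by omega)]
        rw [List.takeWhile_cons_of_pos (by simp), List.dropWhile_cons_of_pos (by simp)]
        by_cases hgt : ((cs.takeWhile (· == '#')).length : Int) + (i + 1) > 6
        · rw [if_pos hgt, if_pos (by simp only [List.length_cons]; push_cast; omega)]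
        · rw [if_neg hgt, if_neg (by simp only [List.length_cons]; push_cast; omega)]
      · have hi6 : i = 6 := by omega
        subst hi6
        rw [show isHeadingLoopA 6 ('#' :: cs) = some false by simp [isHeadingLoopA]]
        rw [if_pos (by
          rw [List.takeWhile_cons_of_pos (by simp)]
          simp only [List.length_cons]; push_cast; omega)]
    · have hb : (c == '#') = false := by simp [hc]
      rw [List.takeWhile_cons_of_neg (by simp [hc]), List.dropWhile_cons_of_neg (by simp [hc])]
      rw [show isHeadingLoopA i (c :: cs) = (if i < 7 && c == ' ' then some true else some false) by
        simp [isHeadingLoopA, hb]]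
      have hcond : ¬ (((([] : List Char).length : Int)) + i > 6) := by simp; omega
      rw [if_neg hcond]
      have h7 : decide (i < 7) = true := by simp; omega
      by_cases hs : c = ' ' <;> simp [hs, h7]

-- the two lengths add up to the whole list's length
theorem takeWhile_dropWhile_length (cs : List Char) :
    (cs.takeWhile (· == '#')).length + (cs.dropWhile (· == '#')).length = cs.length := by
  induction cs with
  | nil => simp
  | cons c cs ih =>
    by_cases h : (c == '#') = true <;> simp [h] <;> omega

-- dropping (count of leading hashes) elements = dropWhile
theorem drop_takeWhile_length (cs : List Char) :
    List.drop (cs.takeWhile (· == '#')).length cs = cs.dropWhile (· == '#') := by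
  induction cs with
  | nil => simp
  | cons c cs ih =>
    by_cases h : (c == '#') = true <;> simp [h, ih]

-- drop (B's level) = dropWhile
theorem drop_level_eq (cs : List Char) :
    cs.drop ((cs.length : Int) - ((cs.dropWhile (· == '#')).length : Int)).toNat
      = cs.dropWhile (· == '#') := by
  have hl := takeWhile_dropWhile_length cs
  rw [show ((cs.length : Int) - ((cs.dropWhile (· == '#')).length : Int)).toNat
      = (cs.takeWhile (· == '#')).length by omega]
  exact drop_takeWhile_length cs

-- ===== VERDICT (by name: the statement is the Claim_ definition above) =====
theorem is_heading_block_spec : Claim_equal_is_heading_block := by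
  intro markdown _ _
  unfold Spec_is_heading_block is_heading_block is_heading_block_alt
  cases h : markdown.toList with
  | nil => rfl
  | cons c cs =>
    by_cases hc : c = '#'
    · subst hc
      simp only [h]
      rw [isHeadingLoopA_eq _ 0 (by norm_num) (by norm_num)]
      rw [drop_level_eq]
      have hl := takeWhile_dropWhile_length ('#' :: cs)
      simp only [beq_self_eq_true, if_pos, bne_self_eq_false, Bool.false_eq_true, if_false]
      by_cases hgt : ((('#' :: cs).takeWhile (· == '#')).length : Int) + 0 > 6
      · rw [if_pos hgt, if_pos (by push_cast; omega)]
      · rw [if_neg hgt, if_neg (by push_cast; omega)]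
    · have hb : (c == '#') = false := by simp [hc]
      simp [hb, hc]
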